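-- pv_equiv track=rewrite | github.com/klark142/Algorithms_and_data_structures | Egzaminy/2021/zad1.py | chaos_index
-- ===== SOURCE A (Python) =====
-- def merge_sort(arr, key):
--     if len(arr) > 1:
--         mid = len(arr) // 2
--         left = arr[:mid]
--         right = arr[mid:]
--         merge_sort(left, key)
--         merge_sort(right, key)
--
--         i, j, k = 0, 0, 0
--         while i < len(left) and j < len(right):
--             if left[i][key] <= right[j][key]:
--                 arr[k] = left[i]
--                 i += 1
--
--             else:
--                 arr[k] = right[j]
--                 j += 1
--
--             k += 1
--
--         while i < len(left):
--             arr[k] = left[i]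
--             i += 1
--             k += 1
--
--         while j < len(right):
--             arr[k] = right[j]
--             j += 1
--             k += 1
--
-- def chaos_index( T ):
--     # tu prosze wpisac wlasna implementacje
--     n = len(T)
--     aux_arr = []
--     for i in range(n):
--         aux_arr.append([T[i], i])
--
--     merge_sort(aux_arr, 0)
--
--     max_diff = 0
--     for i in range(n):
--         max_diff = max(max_diff, abs(aux_arr[i][1] - i))
--
--     return max_diff
-- ===== SOURCE B (Python) =====
-- def chaos_index(T):
--     best = 0
--     for i, v in enumerate(T):
--         r = sum(1 for w in T if w < v) + sum(1 for w in T[:i] if w == v)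
--         best = max(best, abs(r - i))
--     return best
-- ===== Notes on version B (the rewrite author's own statement) =====
-- stated objective: alternative
-- what changed: Replaces the stable merge sort of (value, index) pairs by a direct per-element computation of the stable sorted rank (count of smaller values plus count of earlier equal values), so no sorting or merging happens at all.
import Mathlib
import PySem

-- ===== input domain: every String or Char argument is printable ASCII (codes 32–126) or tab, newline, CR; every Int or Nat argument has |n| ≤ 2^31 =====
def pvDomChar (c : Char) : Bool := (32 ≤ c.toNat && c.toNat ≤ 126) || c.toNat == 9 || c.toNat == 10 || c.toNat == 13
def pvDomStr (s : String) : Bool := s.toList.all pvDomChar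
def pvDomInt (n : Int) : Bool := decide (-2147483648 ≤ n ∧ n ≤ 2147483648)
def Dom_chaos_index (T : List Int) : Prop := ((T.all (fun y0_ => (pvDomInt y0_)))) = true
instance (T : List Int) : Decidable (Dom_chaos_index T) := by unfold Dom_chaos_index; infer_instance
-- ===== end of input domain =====

-- B replaces A's stable merge sort of (value, index) pairs by a direct per-element counting
-- computation of each element's stable sorted rank; same return value, no sorting (alternative
-- decomposition, not claimed faster). A mutates only a local aux list, so no observable mutation.

-- ===== PORT A =====
-- A indexes its 2-element lists [T[i], i] by the integer 'key'; here a pair with the same selector.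
def pvPairKey (p : Int × Int) (key : Int) : Int := if key = 0 then p.1 else p.2

-- the three merge 'while' loops of merge_sort, as the obvious structural recursion
def pvMerge (key : Int) : List (Int × Int) → List (Int × Int) → List (Int × Int)
  | [], right => right
  | a :: l, [] => a :: l
  | a :: l, b :: r =>
      if pvPairKey a key ≤ pvPairKey b key then a :: pvMerge key l (b :: r)
      else b :: pvMerge key (a :: l) r

-- merge_sort sorts arr in place; ported as a function returning the sorted list
def pvMergeSort (arr : List (Int × Int)) (key : Int) : List (Int × Int) :=
  if h : arr.length > 1 then
    let mid := arr.length / 2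
    pvMerge key (pvMergeSort (arr.take mid) key) (pvMergeSort (arr.drop mid) key)
  else arr
termination_by arr.length
decreasing_by
  · simp only [List.length_take]; omega
  · simp only [List.length_drop]; omega

-- 'for i in range(n): aux_arr.append([T[i], i])'
def pvBuildAux : List Int → Int → List (Int × Int)
  | [], _ => []
  | v :: t, i => (v, i) :: pvBuildAux t (i + 1)

-- 'for i in range(n): max_diff = max(max_diff, abs(aux_arr[i][1] - i))'
def pvMaxLoop : List (Int × Int) → Int → Int → Int
  | [], _, m => m
  | p :: rest, i, m => pvMaxLoop rest (i + 1) (max m |p.2 - i|)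

def chaos_index (T : List Int) : Int :=
  pvMaxLoop (pvMergeSort (pvBuildAux T 0) 0) 0 0

-- ===== PORT B =====
def pvAltGo (T : List Int) : List Int → Nat → Int → Int
  | [], _, best => best
  | v :: rest, i, best =>
      let r : Int := (T.countP (fun w => decide (w < v)) : Int)
                   + ((T.take i).countP (fun w => w == v) : Int)
      pvAltGo T rest (i + 1) (max best |r - (i : Int)|)

def chaos_index_alt (T : List Int) : Int := pvAltGo T T 0 0

-- ===== PRECONDITION & SPEC =====
def Spec_chaos_index (T : List Int) (out : Int) : Prop := out = chaos_index_alt T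
instance (T : List Int) (out : Int) : Decidable (Spec_chaos_index T out) := by unfold Spec_chaos_index; infer_instance

-- ===== CLAIM (what is proved, stated in full; the proofs are below) =====
def Claim_equal_chaos_index : Prop := ∀ (T : List Int), Dom_chaos_index T → Spec_chaos_index T (chaos_index T)

-- ===== LEMMAS AND PROOFS =====

-- strict lexicographic order on (value, index) pairs
def pvLexLT (p q : Int × Int) : Bool := decide (p.1 < q.1) || (p.1 == q.1 && decide (p.2 < q.2))

-- the |rank - index| that B computes, as a function of the pair
def pvG (T : List Int) (p : Int × Int) : Int :=
  |((T.countP (fun w => decide (w < p.1)) : Int)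
    + ((T.take p.2.toNat).countP (fun w => w == p.1) : Int)) - p.2|

theorem pvLexLT_irrefl (p : Int × Int) : pvLexLT p p = false := by
  simp [pvLexLT]

theorem pvLexLT_asymm {p q : Int × Int} (h : pvLexLT p q = true) : pvLexLT q p = false := by
  simp only [pvLexLT, Bool.or_eq_true, decide_eq_true_eq, Bool.and_eq_true, beq_iff_eq,
    Bool.or_eq_false_iff, decide_eq_false_iff_not, Bool.and_eq_false_iff, beq_eq_false_iff_ne] at *
  omega

theorem pvLexLT_trans {p q r : Int × Int} (h1 : pvLexLT p q = true) (h2 : pvLexLT q r = true) :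
    pvLexLT p r = true := by
  simp only [pvLexLT, Bool.or_eq_true, decide_eq_true_eq, Bool.and_eq_true, beq_iff_eq] at *
  omega

theorem mem_buildAux_le {t : List Int} {b : Int} {p : Int × Int} (h : p ∈ pvBuildAux t b) :
    b ≤ p.2 := by
  induction t generalizing b with
  | nil => simp [pvBuildAux] at h
  | cons v t ih =>
    simp only [pvBuildAux, List.mem_cons] at h
    rcases h with rfl | h
    · simp
    · have := ih h; omega

theorem buildAux_pairwise (t : List Int) (b : Int) :
    (pvBuildAux t b).Pairwise (fun p q => p.2 < q.2) := by
  induction t generalizing b with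
  | nil => simp [pvBuildAux]
  | cons v t ih =>
    simp only [pvBuildAux]
    exact List.Pairwise.cons (fun q hq => by have := mem_buildAux_le hq; omega) (ih (b + 1))

theorem buildAux_countP_lt (t : List Int) (b : Int) (v : Int) :
    (pvBuildAux t b).countP (fun q => decide (q.1 < v)) = t.countP (fun w => decide (w < v)) := by
  induction t generalizing b with
  | nil => simp [pvBuildAux]
  | cons w t ih => simp [pvBuildAux, List.countP_cons, ih]

theorem buildAux_countP_zero (t : List Int) (b : Int) (v : Int) (c : Int) (hc : c ≤ b) :
    (pvBuildAux t b).countP (fun q => q.1 == v && decide (q.2 < c)) = 0 := by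
  rw [List.countP_eq_zero]
  intro q hq
  have := mem_buildAux_le hq
  simp only [Bool.and_eq_true, beq_iff_eq, decide_eq_true_eq, not_and]
  omega

theorem buildAux_countP_eq (t : List Int) (b : Int) (v : Int) (i : Nat) :
    (pvBuildAux t b).countP (fun q => q.1 == v && decide (q.2 < b + (i : Int)))
      = (t.take i).countP (fun w => w == v) := by
  induction t generalizing b i with
  | nil => simp [pvBuildAux]
  | cons w t ih =>
    cases i with
    | zero =>
      simp only [Nat.cast_zero, add_zero, List.take_zero, List.countP_nil]
      exact buildAux_countP_zero (w :: t) b v b le_rfl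
    | succ j =>
      simp only [pvBuildAux, List.countP_cons, List.take_succ_cons]
      have hhead : ((w, b).1 == v && decide ((w, b).2 < b + ((j + 1 : Nat) : Int))) = (w == v) := by
        simp
      have hcong : (pvBuildAux t (b + 1)).countP (fun q => q.1 == v && decide (q.2 < b + ((j + 1 : Nat) : Int)))
          = (pvBuildAux t (b + 1)).countP (fun q => q.1 == v && decide (q.2 < (b + 1) + (j : Int))) := by
        apply List.countP_congr
        intro q _
        have : b + ((j + 1 : Nat) : Int) = (b + 1) + (j : Int) := by push_cast; ring
        rw [this]
      rw [hhead, hcong, ih]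

theorem countP_or_disj {α : Type} (l : List α) (p q : α → Bool)
    (h : ∀ x ∈ l, ¬(p x = true ∧ q x = true)) :
    l.countP (fun x => p x || q x) = l.countP p + l.countP q := by
  induction l with
  | nil => simp
  | cons a l ih =>
    have ha := h a (by simp)
    have ih' := ih (fun x hx => h x (by simp [hx]))
    simp only [List.countP_cons, ih']
    cases hp : p a <;> cases hq : q a <;> simp_all <;> omega

-- B's rank of a pair p in aux equals the number of pairs lexicographically below p
theorem rank_formula (T : List Int) (p : Int × Int) (hp : p ∈ pvBuildAux T 0) :
    ((pvBuildAux T 0).countP (fun q => pvLexLT q p) : Int)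
      = (T.countP (fun w => decide (w < p.1)) : Int)
        + ((T.take p.2.toNat).countP (fun w => w == p.1) : Int) := by
  have h0 : (0 : Int) ≤ p.2 := mem_buildAux_le hp
  have hsplit : (pvBuildAux T 0).countP (fun q => pvLexLT q p)
      = (pvBuildAux T 0).countP (fun q => decide (q.1 < p.1))
        + (pvBuildAux T 0).countP (fun q => q.1 == p.1 && decide (q.2 < p.2)) := by
    rw [← countP_or_disj]
    · rfl
    · intro x _
      simp only [decide_eq_true_eq, Bool.and_eq_true, beq_iff_eq, not_and]
      intro h1 h2; omega
  have hb : (pvBuildAux T 0).countP (fun q => q.1 == p.1 && decide (q.2 < p.2))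
      = (T.take p.2.toNat).countP (fun w => w == p.1) := by
    have := buildAux_countP_eq T 0 p.1 p.2.toNat
    simpa [Int.toNat_of_nonneg h0] using this
  rw [hsplit, buildAux_countP_lt, hb]
  push_cast; ring

theorem merge_perm (l r : List (Int × Int)) : List.Perm (pvMerge 0 l r) (l ++ r) := by
  induction l generalizing r with
  | nil => cases r <;> simp [pvMerge]
  | cons a l ihl =>
    induction r with
    | nil => simp [pvMerge]
    | cons b r ihr =>
      simp only [pvMerge]
      split
      · exact (ihl (b :: r)).cons a
      · exact (ihr.cons b).trans List.perm_middle.symm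

theorem merge_sorted (l r : List (Int × Int))
    (hl : l.Pairwise (fun p q => pvLexLT p q = true))
    (hr : r.Pairwise (fun p q => pvLexLT p q = true))
    (hcross : ∀ a ∈ l, ∀ b ∈ r, a.2 < b.2) :
    (pvMerge 0 l r).Pairwise (fun p q => pvLexLT p q = true) := by
  induction l generalizing r with
  | nil => cases r <;> simpa [pvMerge] using hr
  | cons a l ihl =>
    induction r with
    | nil => simp only [pvMerge]; exact hl
    | cons b r ihr =>
      rcases List.pairwise_cons.mp hl with ⟨hal, hl'⟩
      rcases List.pairwise_cons.mp hr with ⟨hbr, hr'⟩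
      simp only [pvMerge, pvPairKey, reduceIte]
      split
      · rename_i hle
        refine List.pairwise_cons.mpr ⟨?_, ?_⟩
        · intro x hx
          have hx' : x ∈ l ++ b :: r := (merge_perm l (b :: r)).mem_iff.mp hx
          have hab : pvLexLT a b = true := by
            have h2 := hcross a (by simp) b (by simp)
            simp only [pvLexLT, Bool.or_eq_true, decide_eq_true_eq, Bool.and_eq_true, beq_iff_eq]
            omega
          rcases List.mem_append.mp hx' with hx1 | hx2
          · exact hal x hx1
          · rcases List.mem_cons.mp hx2 with rfl | hx3
            · exact hab
            · exact pvLexLT_trans hab (hbr x hx3)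
        · exact ihl (b :: r) hl' hr (fun x hx y hy => hcross x (List.mem_cons_of_mem a hx) y hy)
      · rename_i hgt
        refine List.pairwise_cons.mpr ⟨?_, ?_⟩
        · intro x hx
          have hx' : x ∈ a :: l ++ r := (merge_perm (a :: l) r).mem_iff.mp hx
          have hba : pvLexLT b a = true := by
            simp only [pvLexLT, Bool.or_eq_true, decide_eq_true_eq, Bool.and_eq_true, beq_iff_eq]
            omega
          rcases List.mem_cons.mp hx' with rfl | hx2
          · exact hba
          · rcases List.mem_append.mp hx2 with hx3 | hx4
            · exact pvLexLT_trans hba (hal x hx3)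
            · exact hbr x hx4
        · exact ihr hr' (fun x hx y hy => hcross x hx y (by simp [hy]))

theorem msort_perm (n : Nat) : ∀ l : List (Int × Int), l.length ≤ n → List.Perm (pvMergeSort l 0) l := by
  induction n with
  | zero =>
    intro l hl
    have : l = [] := List.length_eq_zero_iff.mp (Nat.le_zero.mp hl)
    subst this
    rw [pvMergeSort]; simp
  | succ n ih =>
    intro l hl
    rw [pvMergeSort]
    split
    · rename_i h
      have h1 : (l.take (l.length / 2)).length ≤ n := by simp [List.length_take]; omega
      have h2 : (l.drop (l.length / 2)).length ≤ n := by simp [List.length_drop]; omega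
      refine (merge_perm _ _).trans ?_
      have := ((ih _ h1).append (ih _ h2))
      rw [List.take_append_drop] at this
      exact this
    · exact List.Perm.refl l

theorem msort_sorted (n : Nat) : ∀ l : List (Int × Int), l.length ≤ n →
    l.Pairwise (fun p q => p.2 < q.2) →
    (pvMergeSort l 0).Pairwise (fun p q => pvLexLT p q = true) := by
  induction n with
  | zero =>
    intro l hl _
    have : l = [] := List.length_eq_zero_iff.mp (Nat.le_zero.mp hl)
    subst this
    rw [pvMergeSort]; simp
  | succ n ih =>
    intro l hl hsec
    rw [pvMergeSort]
    split
    · rename_i h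
      have h1 : (l.take (l.length / 2)).length ≤ n := by simp [List.length_take]; omega
      have h2 : (l.drop (l.length / 2)).length ≤ n := by simp [List.length_drop]; omega
      have hsec1 : (l.take (l.length / 2)).Pairwise (fun p q => p.2 < q.2) :=
        hsec.sublist (List.take_sublist _ _)
      have hsec2 : (l.drop (l.length / 2)).Pairwise (fun p q => p.2 < q.2) :=
        hsec.sublist (List.drop_sublist _ _)
      have hcross0 : ∀ a ∈ l.take (l.length / 2), ∀ b ∈ l.drop (l.length / 2), a.2 < b.2 := by
        have := (List.pairwise_append.mp
          (by rw [List.take_append_drop] ; exact hsec :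
            (l.take (l.length / 2) ++ l.drop (l.length / 2)).Pairwise (fun p q => p.2 < q.2))).2.2
        exact this
      apply merge_sorted
      · exact ih _ h1 hsec1
      · exact ih _ h2 hsec2
      · intro a ha b hb
        exact hcross0 a ((msort_perm n _ h1).mem_iff.mp ha) b ((msort_perm n _ h2).mem_iff.mp hb)
    · -- length ≤ 1: a list with at most one element is vacuously pairwise
      rename_i h
      match l, hl with
      | [], _ => simp
      | [a], _ => simp
      | a :: b :: l, _ => simp at h

-- in a strictly sorted list, the number of elements below S[k] is exactly k
theorem sorted_countP_idx (S : List (Int × Int))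
    (hS : S.Pairwise (fun p q => pvLexLT p q = true)) :
    ∀ (k : Nat) (p : Int × Int), S[k]? = some p → S.countP (fun q => pvLexLT q p) = k := by
  induction S with
  | nil => intro k p hk; simp at hk
  | cons a S ih =>
    rcases List.pairwise_cons.mp hS with ⟨ha, hS'⟩
    intro k p hk
    cases k with
    | zero =>
      simp only [List.getElem?_cons_zero, Option.some.injEq] at hk
      subst hk
      have h0 : S.countP (fun q => pvLexLT q a) = 0 := by
        rw [List.countP_eq_zero]
        intro q hq
        simp [pvLexLT_asymm (ha q hq)]
      simp [pvLexLT_irrefl, h0]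
    | succ k =>
      simp only [List.getElem?_cons_succ] at hk
      have hpS : p ∈ S := List.mem_of_getElem? hk
      rw [List.countP_cons, ih hS' k p hk]
      simp [ha p hpS]

-- A's final loop, rewritten as a fold of pvG when index = displacement target
theorem maxLoop_congr (T : List Int) (l : List (Int × Int)) (i : Int) (m : Int)
    (h : ∀ (k : Nat) (p : Int × Int), l[k]? = some p → |p.2 - (i + k)| = pvG T p) :
    pvMaxLoop l i m = l.foldl (fun m p => max m (pvG T p)) m := by
  induction l generalizing i m with
  | nil => simp [pvMaxLoop]
  | cons p l ih =>
    simp only [pvMaxLoop, List.foldl_cons]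
    have h0 : |p.2 - i| = pvG T p := by
      have := h 0 p (by simp)
      simpa using this
    rw [h0]
    apply ih
    intro k q hk
    have := h (k + 1) q (by simpa using hk)
    have harith : i + ((k : Int) + 1) = (i + 1) + (k : Int) := by ring
    rw [← this]
    congr 1
    push_cast
    ring

-- B's loop as a fold of pvG over the (value, index) pairs
theorem altGo_eq_foldl (T : List Int) :
    ∀ (t : List Int) (i : Nat) (best : Int),
    pvAltGo T t i best = (pvBuildAux t (i : Int)).foldl (fun m p => max m (pvG T p)) best := by
  intro t
  induction t with
  | nil => intro i best; simp [pvAltGo, pvBuildAux]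
  | cons v t ih =>
    intro i best
    simp only [pvAltGo, pvBuildAux, List.foldl_cons]
    rw [ih (i + 1)]
    have hG : pvG T (v, (i : Int)) =
        |((T.countP (fun w => decide (w < v)) : Int) + ((T.take i).countP (fun w => w == v) : Int))
          - (i : Int)| := by
      simp [pvG]
    have hc : ((i : Int) + 1) = ((i + 1 : Nat) : Int) := by push_cast; ring
    rw [hG, ← hc]

theorem chaos_index_spec : Claim_equal_chaos_index := by
  intro T _
  unfold Spec_chaos_index chaos_index chaos_index_alt
  set aux := pvBuildAux T 0 with haux
  set S := pvMergeSort aux 0 with hS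
  have hperm : List.Perm S aux := msort_perm aux.length aux le_rfl
  have hsorted : S.Pairwise (fun p q => pvLexLT p q = true) :=
    msort_sorted aux.length aux le_rfl (buildAux_pairwise T 0)
  have hmain : pvMaxLoop S 0 0 = S.foldl (fun m p => max m (pvG T p)) 0 := by
    apply maxLoop_congr
    intro k p hk
    have hpmem : p ∈ aux := hperm.mem_iff.mp (List.mem_of_getElem? hk)
    have hcount : S.countP (fun q => pvLexLT q p) = k := sorted_countP_idx S hsorted k p hk
    have hcount' : aux.countP (fun q => pvLexLT q p) = k := by
      rw [← hperm.countP_eq]; exact hcount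
    have hrank := rank_formula T p hpmem
    rw [hcount'] at hrank
    unfold pvG
    rw [← hrank]
    rw [zero_add, abs_sub_comm]
  rw [hmain]
  have hfold : S.foldl (fun m p => max m (pvG T p)) 0 = aux.foldl (fun m p => max m (pvG T p)) 0 := by
    exact @List.Perm.foldl_eq _ _ (fun m p => max m (pvG T p)) _ _
      ⟨fun b a a' => by simp [max_right_comm]⟩ hperm 0
  rw [hfold, altGo_eq_foldl T T 0 0, haux]
  norm_num

-- ===== VERDICT (by name: the statement is the Claim_ definition above) =====
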